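-- pv_equiv track=rewrite | github.com/Geonu-Lee/Algorithm | 프로그래머스/2/154540. 무인도 여행/무인도 여행.py | solution
-- ===== SOURCE A (Python) =====
-- from collections import deque
--
-- def bfs(x, y, m, n, visited, maps):
--     directions = [(1,0), (-1,0), (0,1), (0,-1)]
--     q = deque()
--     q.append((x, y))
--     visited[x][y] = 1
--     count = int(maps[x][y])
--     while q:
--         px, py = q.popleft()
--         for (dx, dy) in directions:
--             nx, ny = px + dx, py + dy
--             if 0 <= nx < m and 0 <= ny < n \
--                 and maps[nx][ny] != "X" and visited[nx][ny] == 0: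
--                 q.append((nx, ny))
--                 count += int(maps[nx][ny])
--                 visited[nx][ny] = 1
--     return count
--
-- def solution(maps):
--     answer = []
--     m, n = len(maps), len(maps[0])
--     visited = [[0] * n for _ in range(m)]
--
--     for x in range(m):
--         for y in range(n):
--             if maps[x][y] != "X" and visited[x][y] == 0:
--                 count = bfs(x, y, m, n, visited, maps)
--                 answer.append(count)
--
--     if len(answer) == 0:
--         return [-1]
--     else:
--         return sorted(answer)
-- ===== SOURCE B (Python) =====
-- def solution(maps):
--     m, n = len(maps), len(maps[0])
--     seen = set()
--     sums = []
--     for x in range(m):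
--         for y in range(n):
--             if maps[x][y] != "X" and (x, y) not in seen:
--                 total = 0
--                 stack = [(x, y)]
--                 while stack:
--                     px, py = stack.pop()
--                     if not (0 <= px < m and 0 <= py < n) or maps[px][py] == "X" or (px, py) in seen:
--                         continue
--                     seen.add((px, py))
--                     total += int(maps[px][py])
--                     stack += [(px + 1, py), (px - 1, py), (px, py + 1), (px, py - 1)]
--                 sums.append(total)
--     return sorted(sums) if sums else [-1]
-- ===== Notes on version B (the rewrite author's own statement) =====
-- stated objective: simpler
-- what changed: A runs a deque-based BFS helper that bounds-checks, marks and counts each neighbour at enqueue time into a preallocated visited matrix; B is a self-contained stack flood fill that pushes raw neighbours and validates, marks and counts each cell once at pop time against a seen-set, so the helper function, the deque and the visited matrix all disappear.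
import Mathlib
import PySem

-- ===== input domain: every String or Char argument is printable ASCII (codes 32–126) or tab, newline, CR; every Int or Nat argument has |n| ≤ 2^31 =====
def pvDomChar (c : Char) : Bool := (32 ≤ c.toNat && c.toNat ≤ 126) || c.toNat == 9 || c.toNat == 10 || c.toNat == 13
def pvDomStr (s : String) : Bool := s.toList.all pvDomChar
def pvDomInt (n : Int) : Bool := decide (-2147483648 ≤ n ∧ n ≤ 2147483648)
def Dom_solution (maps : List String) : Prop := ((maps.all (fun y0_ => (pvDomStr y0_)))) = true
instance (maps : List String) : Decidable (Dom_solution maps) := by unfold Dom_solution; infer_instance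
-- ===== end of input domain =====

-- B replaces A's deque BFS (guard-and-count on enqueue) by a stack flood fill that
-- validates, marks and counts on pop, tracking seen cells in a set; objective: simpler.
-- NOTE: A mutates its `visited` argument inside the helper `bfs`; the equivalence proved
-- here is about `solution`'s return value only.

-- ===== SHARED CELL ACCESSORS (used by both ports) =====
-- maps[x][y] as a total function: both Pythons only read it after a bounds check, or at
-- positions Pre_solution guarantees to exist (Python raises IndexError elsewhere).
def pvCell (maps : List String) (x y : Int) : Char :=
  (PySem.List.pyGet? ((PySem.List.pyGet? maps x).getD "").toList y).getD 'X'

-- int(maps[x][y]) (total form; Pre_solution guarantees a digit wherever it is reached,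
-- Python raises ValueError elsewhere)
def pvVal (maps : List String) (x y : Int) : Int :=
  (PySem.Int.ofChars? [pvCell maps x y]).getD 0

-- len(maps[0]) (Python raises IndexError on maps = [], excluded by Pre_solution)
def pvN (maps : List String) : Int := (((PySem.List.pyGet? maps 0).getD "").toList.length : Int)

-- ===== PORT A =====
-- visited[x][y] as an Option (read only after bounds checks / at existing positions)
def pvVGet (v : List (List Int)) (x y : Int) : Option Int :=
  (PySem.List.pyGet? v x).bind (fun r => PySem.List.pyGet? r y)

-- visited[x][y] = 1
def pvVSet (v : List (List Int)) (x y : Int) : List (List Int) :=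
  PySem.List.pySetD v x (PySem.List.pySetD ((PySem.List.pyGet? v x).getD []) y 1)

def pvDirections : List (Int × Int) := [(1,0),(-1,0),(0,1),(0,-1)]

-- one direction of A's inner `for (dx, dy) in directions` (state: queue, visited, count)
def pvBfsStep (m n : Int) (maps : List String) (px py : Int)
    (st : List (Int × Int) × List (List Int) × Int) (d : Int × Int) :
    List (Int × Int) × List (List Int) × Int :=
  -- nx = px + dx, ny = py + dy, inlined
  if 0 ≤ px + d.1 ∧ px + d.1 < m ∧ 0 ≤ py + d.2 ∧ py + d.2 < n ∧
      pvCell maps (px + d.1) (py + d.2) ≠ 'X' ∧ pvVGet st.2.1 (px + d.1) (py + d.2) = some 0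
  then (st.1 ++ [(px + d.1, py + d.2)], pvVSet st.2.1 (px + d.1) (py + d.2),
        st.2.2 + pvVal maps (px + d.1) (py + d.2))
  else st

-- number of 0 entries of visited (termination measure only)
def pvZeros (v : List (List Int)) : Nat := (v.map (fun r => r.count 0)).sum

theorem pvCountSetLt (l : List Int) (j : Nat) (h : l[j]? = some 0) :
    (l.set j (1 : Int)).count 0 < l.count 0 := by
  induction l generalizing j with
  | nil => simp at h
  | cons a t ih =>
    cases j with
    | zero =>
      simp only [List.getElem?_cons_zero, Option.some.injEq] at h
      subst h
      simp
    | succ j =>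
      simp only [List.getElem?_cons_succ] at h
      have := ih j h
      simp only [List.set_cons_succ, List.count_cons]
      omega

theorem pvZerosSetLt (v : List (List Int)) (i : Nat) (r r' : List Int)
    (h : v[i]? = some r) (hlt : r'.count 0 < r.count 0) :
    pvZeros (v.set i r') < pvZeros v := by
  induction v generalizing i with
  | nil => simp at h
  | cons a t ih =>
    cases i with
    | zero =>
      simp only [List.getElem?_cons_zero, Option.some.injEq] at h
      subst h
      simp only [List.set_cons_zero, pvZeros, List.map_cons, List.sum_cons]
      omega
    | succ i =>
      simp only [List.getElem?_cons_succ] at h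
      have := ih i h
      simp only [List.set_cons_succ, pvZeros, List.map_cons, List.sum_cons] at *
      omega

theorem pvZeros_set_lt (v : List (List Int)) (x y : Int)
    (hx : 0 ≤ x) (hy : 0 ≤ y) (h : pvVGet v x y = some 0) :
    pvZeros (pvVSet v x y) < pvZeros v := by
  unfold pvVGet at h
  rw [PySem.List.pyGet?_of_nonneg _ hx] at h
  cases hr : v[x.toNat]? with
  | none => rw [hr] at h; simp at h
  | some r =>
    rw [hr] at h
    simp only [Option.bind_some] at h
    rw [PySem.List.pyGet?_of_nonneg _ hy] at h
    unfold pvVSet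
    rw [PySem.List.pyGet?_of_nonneg _ hx, hr]
    simp only [Option.getD_some]
    rw [PySem.List.pySetD_of_nonneg _ _ hy, PySem.List.pySetD_of_nonneg _ _ hx]
    exact pvZerosSetLt v x.toNat r _ hr (pvCountSetLt r y.toNat h)

theorem pvBfsStep_measure (m n : Int) (maps : List String) (px py : Int)
    (ds : List (Int × Int)) (st : List (Int × Int) × List (List Int) × Int) :
    2 * pvZeros (ds.foldl (pvBfsStep m n maps px py) st).2.1
        + (ds.foldl (pvBfsStep m n maps px py) st).1.length
      ≤ 2 * pvZeros st.2.1 + st.1.length := by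
  induction ds generalizing st with
  | nil => exact le_refl _
  | cons d ds ih =>
    simp only [List.foldl_cons]
    refine le_trans (ih _) ?_
    unfold pvBfsStep
    split
    · rename_i hc
      have := pvZeros_set_lt st.2.1 (px + d.1) (py + d.2) hc.1 hc.2.2.1 hc.2.2.2.2.2
      simp only [List.length_append, List.length_cons, List.length_nil]
      omega
    · exact le_refl _

-- A's `while q:` loop
def pvBfsLoop (m n : Int) (maps : List String)
    (q : List (Int × Int)) (visited : List (List Int)) (count : Int) :
    Int × List (List Int) :=
  match q with
  | [] => (count, visited)
  | (px, py) :: rest =>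
    let st := pvDirections.foldl (pvBfsStep m n maps px py) (rest, visited, count)
    pvBfsLoop m n maps st.1 st.2.1 st.2.2
termination_by 2 * pvZeros visited + q.length
decreasing_by
  have h := pvBfsStep_measure m n maps px py pvDirections (rest, visited, count)
  simp only [List.length_cons] at h ⊢
  omega

-- bfs(x, y, m, n, visited, maps); returns (count, visited) since Python mutates visited
def pvBfs (x y m n : Int) (visited : List (List Int)) (maps : List String) :
    Int × List (List Int) :=
  pvBfsLoop m n maps [(x, y)] (pvVSet visited x y) (pvVal maps x y)

def solution (maps : List String) : List Int :=
  let m : Int := (maps.length : Int)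
  let n : Int := pvN maps
  let visited0 : List (List Int) :=
    List.replicate maps.length (List.replicate (pvN maps).toNat 0)
  let st := (PySem.List.pyRange 0 m 1).foldl
    (fun (st : List (List Int) × List Int) x =>
      (PySem.List.pyRange 0 n 1).foldl
        (fun (st : List (List Int) × List Int) y =>
          if pvCell maps x y ≠ 'X' ∧ pvVGet st.1 x y = some 0 then
            let r := pvBfs x y m n st.1 maps
            (r.2, st.2 ++ [r.1])
          else st) st) (visited0, [])
  if st.2.length = 0 then [-1] else PySem.List.sorted st.2 (fun v => v) false

-- ===== PORT B =====
-- all grid cells (termination measure only)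
def pvGrid (m n : Int) : List (Int × Int) :=
  (PySem.List.pyRange 0 m 1).flatMap (fun x => (PySem.List.pyRange 0 n 1).map (fun y => (x, y)))

-- grid cells not yet seen (termination measure only)
def pvUnseen (m n : Int) (seen : PySem.Set (Int × Int)) : Nat :=
  ((pvGrid m n).filter (fun p => decide (p ∉ seen))).length

theorem pvCountPLt {a : Type} (l : List a) (P Q : a → Bool)
    (hPQ : ∀ x, Q x = true → P x = true) (x : a)
    (hx : x ∈ l) (hP : P x = true) (hQ : Q x = false) :
    l.countP Q < l.countP P := by
  induction l with
  | nil => simp at hx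
  | cons b t ih =>
    simp only [List.countP_cons]
    rcases List.mem_cons.mp hx with hb | hbt
    · subst hb
      rw [hP, hQ]
      have := List.countP_mono_left (l := t) (p := Q) (q := P) (fun a _ => hPQ a)
      simp only [if_true]
      norm_num
      omega
    · have := ih hbt
      cases hQb : Q b with
      | true => rw [hPQ b hQb]; omega
      | false => cases hPb : P b <;> simp <;> omega

theorem pvUnseen_add_lt (m n : Int) (seen : PySem.Set (Int × Int)) (p : Int × Int)
    (h1 : 0 ≤ p.1) (h2 : p.1 < m) (h3 : 0 ≤ p.2) (h4 : p.2 < n) (hp : p ∉ seen) :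
    pvUnseen m n (PySem.Set.add seen p) < pvUnseen m n seen := by
  have hg : p ∈ pvGrid m n := by
    simp only [pvGrid, List.mem_flatMap, List.mem_map, PySem.List.mem_pyRange_one]
    exact ⟨p.1, ⟨h1, h2⟩, p.2, ⟨h3, h4⟩, rfl⟩
  unfold pvUnseen
  simp only [← List.countP_eq_length_filter]
  refine pvCountPLt _ _ _ ?_ p hg (by simpa using hp) ?_
  · intro a ha
    simp only [decide_eq_true_eq, PySem.Set.mem_add] at *
    intro hmem; exact ha (Or.inl hmem)
  · simp [PySem.Set.mem_add]

-- B's `while stack:` loop; stack top is the list head (Python appends/pops at the right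
-- end, so Python's stack is this list reversed; pushes are consed in reverse order)
def pvFloodLoop (m n : Int) (maps : List String)
    (stack : List (Int × Int)) (seen : PySem.Set (Int × Int)) (total : Int) :
    Int × PySem.Set (Int × Int) :=
  match stack with
  | [] => (total, seen)
  | p :: rest =>
    if ¬(0 ≤ p.1 ∧ p.1 < m ∧ 0 ≤ p.2 ∧ p.2 < n) ∨ pvCell maps p.1 p.2 = 'X' ∨ p ∈ seen then
      pvFloodLoop m n maps rest seen total
    else
      pvFloodLoop m n maps
        ((p.1, p.2 - 1) :: (p.1, p.2 + 1) :: (p.1 - 1, p.2) :: (p.1 + 1, p.2) :: rest)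
        (PySem.Set.add seen p) (total + pvVal maps p.1 p.2)
termination_by 5 * pvUnseen m n seen + stack.length
decreasing_by
  · simp only [List.length_cons]; omega
  · rename_i h
    rw [not_or, not_or, not_not] at h
    have := pvUnseen_add_lt m n seen p h.1.1 h.1.2.1 h.1.2.2.1 h.1.2.2.2 h.2.2
    simp only [List.length_cons]
    omega

def solution_alt (maps : List String) : List Int :=
  let m : Int := (maps.length : Int)
  let n : Int := pvN maps
  let st := (PySem.List.pyRange 0 m 1).foldl
    (fun (st : PySem.Set (Int × Int) × List Int) x =>
      (PySem.List.pyRange 0 n 1).foldl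
        (fun (st : PySem.Set (Int × Int) × List Int) y =>
          if pvCell maps x y ≠ 'X' ∧ (x, y) ∉ st.1 then
            let r := pvFloodLoop m n maps [(x, y)] st.1 0
            (r.2, st.2 ++ [r.1])
          else st) st) (PySem.Set.empty, [])
  if st.2 = [] then [-1] else PySem.List.sorted st.2 (fun v => v) false

-- ===== PRECONDITION & SPEC =====
-- Pre_solution is exactly where Python A returns: the grid is nonempty, every row is at
-- least as long as the first (shorter rows raise IndexError), and every character in the
-- first len(maps[0]) columns is a decimal digit or 'X' (int() raises ValueError elsewhere).
-- Both ports are total (out-of-range reads return defaults never reached under Pre_), so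
-- the equivalence proof itself holds on all inputs and does not consume Pre_.
def Pre_solution (maps : List String) : Prop :=
  maps ≠ [] ∧
  ∀ row ∈ maps, (pvN maps).toNat ≤ row.toList.length ∧
    ∀ j : Nat, j < (pvN maps).toNat →
      ((row.toList.getD j 'X').isDigit = true ∨ row.toList.getD j 'X' = 'X')
instance (maps : List String) : Decidable (Pre_solution maps) := by
  unfold Pre_solution; infer_instance

def pvWitness_solution : List String := ["X591X", "X1X5X", "X231X", "1XXX1"]

def Spec_solution (maps : List String) (out : List Int) : Prop := out = solution_alt maps
instance (maps : List String) (out : List Int) : Decidable (Spec_solution maps out) := by unfold Spec_solution; infer_instance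

-- ===== CLAIM (what is proved, stated in full; the proofs are below) =====
def Claim_equal_solution : Prop := ∀ (maps : List String), Dom_solution maps → Pre_solution maps → Spec_solution maps (solution maps)

-- ===== LEMMAS AND PROOFS =====

-- ---- proof-side notions: cells, goodness, reachability, matrix/set representation ----

def pvOk (maps : List String) (m n : Int) (p : Int × Int) : Prop :=
  0 ≤ p.1 ∧ p.1 < m ∧ 0 ≤ p.2 ∧ p.2 < n ∧ pvCell maps p.1 p.2 ≠ 'X'

def pvGood (maps : List String) (m n : Int) (V : List (Int × Int)) (p : Int × Int) : Prop :=
  pvOk maps m n p ∧ p ∉ V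

def pvNbrs (p : Int × Int) : List (Int × Int) :=
  [(p.1 + 1, p.2), (p.1 - 1, p.2), (p.1, p.2 + 1), (p.1, p.2 - 1)]

def pvReach (maps : List String) (m n : Int) (V : List (Int × Int)) (s p : Int × Int) : Prop :=
  Relation.ReflTransGen (fun a b => b ∈ pvNbrs a ∧ pvGood maps m n V b) s p

def pvSumVal (maps : List String) (L : List (Int × Int)) : Int :=
  (L.map (fun p => pvVal maps p.1 p.2)).sum

def pvRepr (M N : Nat) (v : List (List Int)) (seen : List (Int × Int)) : Prop :=
  v.length = M ∧ (∀ i (hi : i < v.length), v[i].length = N) ∧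
  ∀ i j : Nat, i < M → j < N →
    pvVGet v (i : Int) (j : Int) = some (if ((i : Int), (j : Int)) ∈ seen then 1 else 0)

theorem pvRepr_congr {M N : Nat} {v : List (List Int)} {s₁ s₂ : List (Int × Int)}
    (h : ∀ p, p ∈ s₁ ↔ p ∈ s₂) (hr : pvRepr M N v s₁) : pvRepr M N v s₂ := by
  refine ⟨hr.1, hr.2.1, ?_⟩
  intro i j hi hj
  rw [hr.2.2 i j hi hj]
  by_cases hm : ((i : Int), (j : Int)) ∈ s₁
  · rw [if_pos hm, if_pos ((h _).mp hm)]
  · rw [if_neg hm, if_neg (fun hc => hm ((h _).mpr hc))]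

theorem pvRepr_get {M N : Nat} {v : List (List Int)} {seen : List (Int × Int)}
    (hr : pvRepr M N v seen) {x y : Int}
    (hx : 0 ≤ x) (hx2 : x < (M : Int)) (hy : 0 ≤ y) (hy2 : y < (N : Int)) :
    (pvVGet v x y = some 0 ↔ (x, y) ∉ seen) := by
  have h := hr.2.2 x.toNat y.toNat (by omega) (by omega)
  rw [Int.toNat_of_nonneg hx, Int.toNat_of_nonneg hy] at h
  rw [h]
  by_cases hm : (x, y) ∈ seen
  · simp [hm]
  · simp [hm]

theorem pvRepr_set {M N : Nat} {v : List (List Int)} {seen : List (Int × Int)}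
    (hr : pvRepr M N v seen) {x y : Int}
    (hx : 0 ≤ x) (hx2 : x < (M : Int)) (hy : 0 ≤ y) (hy2 : y < (N : Int)) :
    pvRepr M N (pvVSet v x y) (seen ++ [(x, y)]) := by
  obtain ⟨hlen, hshape, hent⟩ := hr
  have hxa : x = ((x.toNat : Nat) : Int) := (Int.toNat_of_nonneg hx).symm
  have hyb : y = ((y.toNat : Nat) : Int) := (Int.toNat_of_nonneg hy).symm
  have haM : x.toNat < v.length := by omega
  have hrowlen : v[x.toNat].length = N := hshape x.toNat haM
  have hbN : y.toNat < v[x.toNat].length := by omega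
  have hset : pvVSet v x y = v.set x.toNat (v[x.toNat].set y.toNat 1) := by
    unfold pvVSet
    rw [PySem.List.pyGet?_of_nonneg _ hx, List.getElem?_eq_getElem haM]
    simp only [Option.getD_some]
    rw [PySem.List.pySetD_of_nonneg _ _ hy, PySem.List.pySetD_of_nonneg _ _ hx]
  rw [hset]
  refine ⟨by simpa using hlen, ?_, ?_⟩
  · intro i hi
    rw [List.getElem_set]
    split
    · simpa using hrowlen
    · exact hshape i (by simpa using hi)
  · intro i j hi hj
    have hold := hent i j hi hj
    unfold pvVGet at hold ⊢
    rw [PySem.List.pyGet?_natCast] at hold ⊢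
    rw [List.getElem?_set]
    by_cases hia : x.toNat = i
    · subst hia
      rw [if_pos rfl, if_pos haM]
      rw [List.getElem?_eq_getElem haM] at hold
      simp only [Option.bind_some] at hold ⊢
      rw [PySem.List.pyGet?_natCast] at hold ⊢
      rw [List.getElem?_set]
      by_cases hjb : y.toNat = j
      · subst hjb
        rw [if_pos rfl, if_pos hbN]
        have hmem : ((x.toNat : Int), (y.toNat : Int)) ∈ seen ++ [(x, y)] := by
          rw [hxa, hyb] at *
          exact List.mem_append_right _ (List.mem_singleton.mpr rfl)
        rw [if_pos hmem]
      · rw [if_neg hjb, hold]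
        have : (((x.toNat : Int), (j : Int)) ∈ seen ++ [(x, y)]) ↔
            (((x.toNat : Int), (j : Int)) ∈ seen) := by
          rw [List.mem_append]
          constructor
          · rintro (h | h)
            · exact h
            · exfalso
              simp only [List.mem_singleton, Prod.mk.injEq] at h
              omega
          · exact Or.inl
        by_cases hm : ((x.toNat : Int), (j : Int)) ∈ seen
        · rw [if_pos hm, if_pos (this.mpr hm)]
        · rw [if_neg hm, if_neg (fun hc => hm (this.mp hc))]
    · rw [if_neg hia, hold]
      have : (((i : Int), (j : Int)) ∈ seen ++ [(x, y)]) ↔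
          (((i : Int), (j : Int)) ∈ seen) := by
        rw [List.mem_append]
        constructor
        · rintro (h | h)
          · exact h
          · exfalso
            simp only [List.mem_singleton, Prod.mk.injEq] at h
            omega
        · exact Or.inl
      by_cases hm : ((i : Int), (j : Int)) ∈ seen
      · rw [if_pos hm, if_pos (this.mpr hm)]
      · rw [if_neg hm, if_neg (fun hc => hm (this.mp hc))]

theorem pvReach_subset {maps : List String} {m n : Int} {V L : List (Int × Int)}
    {s : Int × Int} (hs : s ∈ L)
    (hcl : ∀ p ∈ L, ∀ t ∈ pvNbrs p, pvGood maps m n V t → t ∈ L) :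
    ∀ p, pvReach maps m n V s p → p ∈ L := by
  intro p h
  induction h with
  | refl => exact hs
  | tail h1 h2 ih => exact hcl _ ih _ h2.1 h2.2

-- combined invariant of A's BFS loop (pend: the popped cell being expanded, if any)
def pvInv (maps : List String) (M N : Nat) (s : Int × Int) (V : List (Int × Int)) (c0 : Int)
    (pend : List (Int × Int)) (st : List (Int × Int) × List (List Int) × Int)
    (L : List (Int × Int)) : Prop :=
  pvRepr M N st.2.1 (V ++ L) ∧ L.Nodup ∧ (∀ p ∈ L, p ∉ V) ∧
  (∀ p ∈ L, pvGood maps (M : Int) (N : Int) V p) ∧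
  (∀ p ∈ L, pvReach maps (M : Int) (N : Int) V s p) ∧
  st.2.2 = c0 + pvSumVal maps L ∧ (∀ p ∈ st.1, p ∈ L) ∧
  (∀ p ∈ L, p ∉ pend → p ∉ st.1 →
    ∀ t ∈ pvNbrs p, pvGood maps (M : Int) (N : Int) V t → t ∈ L) ∧
  s ∈ L

theorem pvBfsStep_inv {maps : List String} {M N : Nat} {s : Int × Int}
    {V : List (Int × Int)} {c0 : Int} {p : Int × Int}
    {st : List (Int × Int) × List (List Int) × Int} {L : List (Int × Int)}
    (hp : p ∈ L) (hInv : pvInv maps M N s V c0 [p] st L) {d : Int × Int}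
    (hd : d ∈ pvDirections) :
    ∃ L₂, (∀ x ∈ L, x ∈ L₂) ∧
      pvInv maps M N s V c0 [p] (pvBfsStep (M : Int) (N : Int) maps p.1 p.2 st d) L₂ ∧
      (pvGood maps (M : Int) (N : Int) V (p.1 + d.1, p.2 + d.2) →
        (p.1 + d.1, p.2 + d.2) ∈ L₂) := by
  obtain ⟨hrepr, hnd, hdisj, hgood, hreach, hcount, hq, hcl, hs⟩ := hInv
  have hnbr : (p.1 + d.1, p.2 + d.2) ∈ pvNbrs p := by
    simp only [pvDirections, List.mem_cons, List.not_mem_nil, or_false] at hd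
    rcases hd with h | h | h | h <;> subst h <;> simp [pvNbrs] <;> omega
  unfold pvBfsStep
  split
  · rename_i hc
    obtain ⟨h1, h2, h3, h4, h5, h6⟩ := hc
    have hnotin : (p.1 + d.1, p.2 + d.2) ∉ V ++ L :=
      (pvRepr_get hrepr h1 h2 h3 h4).mp h6
    have htV : (p.1 + d.1, p.2 + d.2) ∉ V := fun h => hnotin (List.mem_append_left _ h)
    have htL : (p.1 + d.1, p.2 + d.2) ∉ L := fun h => hnotin (List.mem_append_right _ h)
    have hgt : pvGood maps (M : Int) (N : Int) V (p.1 + d.1, p.2 + d.2) :=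
      ⟨⟨h1, h2, h3, h4, h5⟩, htV⟩
    refine ⟨L ++ [(p.1 + d.1, p.2 + d.2)], fun x hx => List.mem_append_left _ hx,
      ⟨?_, ?_, ?_, ?_, ?_, ?_, ?_, ?_, ?_⟩, fun _ => List.mem_append_right _ (by simp)⟩
    · have := pvRepr_set hrepr h1 h2 h3 h4
      rwa [List.append_assoc] at this
    · refine List.Nodup.append hnd (List.nodup_singleton _) ?_
      intro a ha hb
      rw [List.mem_singleton.mp hb] at ha
      exact htL ha
    · intro r hr
      rcases List.mem_append.mp hr with h | h
      · exact hdisj r h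
      · rw [List.mem_singleton.mp h]; exact htV
    · intro r hr
      rcases List.mem_append.mp hr with h | h
      · exact hgood r h
      · rw [List.mem_singleton.mp h]; exact hgt
    · intro r hr
      rcases List.mem_append.mp hr with h | h
      · exact hreach r h
      · rw [List.mem_singleton.mp h]
        exact Relation.ReflTransGen.tail (hreach p hp) ⟨hnbr, hgt⟩
    · simp only [pvSumVal, List.map_append, List.sum_append, List.map_cons, List.map_nil,
        List.sum_cons, List.sum_nil]
      simp only [pvSumVal] at hcount
      omega
    · intro r hr
      rcases List.mem_append.mp hr with h | h
      · exact List.mem_append_left _ (hq r h)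
      · exact List.mem_append_right _ h
    · intro r hr hpend hqr
      have hrL : r ∈ L := by
        rcases List.mem_append.mp hr with h | h
        · exact h
        · exact absurd (List.mem_append_right st.1 h) hqr
      intro t ht hgoodt
      exact List.mem_append_left _
        (hcl r hrL hpend (fun hm => hqr (List.mem_append_left _ hm)) t ht hgoodt)
    · exact List.mem_append_left _ hs
  · rename_i hc
    refine ⟨L, fun x hx => hx,
      ⟨hrepr, hnd, hdisj, hgood, hreach, hcount, hq, hcl, hs⟩, ?_⟩
    intro hgt
    obtain ⟨⟨h1, h2, h3, h4, h5⟩, htV⟩ := hgt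
    by_cases h6 : pvVGet st.2.1 (p.1 + d.1) (p.2 + d.2) = some 0
    · exact absurd ⟨h1, h2, h3, h4, h5, h6⟩ hc
    · have : (p.1 + d.1, p.2 + d.2) ∈ V ++ L := by
        by_contra hcon
        exact h6 ((pvRepr_get hrepr h1 h2 h3 h4).mpr hcon)
      rcases List.mem_append.mp this with h | h
      · exact absurd h htV
      · exact h

theorem pvBfsLoop_spec (maps : List String) (M N : Nat) (s : Int × Int)
    (V : List (Int × Int)) (c0 : Int) :
    ∀ (q : List (Int × Int)) (v : List (List Int)) (count : Int),
      ∀ L, pvInv maps M N s V c0 [] (q, v, count) L →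
      ∃ L' c' v', pvBfsLoop (M : Int) (N : Int) maps q v count = (c', v') ∧
        c' = c0 + pvSumVal maps L' ∧ pvRepr M N v' (V ++ L') ∧
        L'.Nodup ∧ (∀ p ∈ L', p ∉ V) ∧
        (∀ p, p ∈ L' ↔ pvGood maps (M : Int) (N : Int) V p ∧
          pvReach maps (M : Int) (N : Int) V s p) := by
  intro q v count
  induction q, v, count using pvBfsLoop.induct (m := (M : Int)) (n := (N : Int)) (maps := maps) with
  | case1 v count =>
    intro L hInv
    obtain ⟨hrepr, hnd, hdisj, hgood, hreach, hcount, hq, hcl, hs⟩ := hInv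
    refine ⟨L, count, v, by rw [pvBfsLoop], hcount, hrepr, hnd, hdisj, ?_⟩
    intro r
    constructor
    · intro hr; exact ⟨hgood r hr, hreach r hr⟩
    · rintro ⟨hg, hrch⟩
      exact pvReach_subset hs
        (fun p hp t ht hgt => hcl p hp (by simp) (by simp) t ht hgt) r hrch
  | case2 v count px py rest stv ih =>
    intro L hInv
    obtain ⟨hrepr, hnd, hdisj, hgood, hreach, hcount, hq, hcl, hs⟩ := hInv
    have hpL : (px, py) ∈ L := hq _ (by simp)
    have hinv1 : pvInv maps M N s V c0 [(px, py)] (rest, v, count) L := by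
      refine ⟨hrepr, hnd, hdisj, hgood, hreach, hcount,
        fun r hr => hq r (by simp [hr]), ?_, hs⟩
      intro r hr h1 h2
      exact hcl r hr (by simp) (by
        simp only [List.mem_cons]
        rintro (h | h)
        · exact h1 (by simp [h])
        · exact h2 h)
    obtain ⟨L1, hsub1, hinv2, hfact1⟩ :=
      pvBfsStep_inv (p := (px, py)) hpL hinv1 (d := ((1 : Int), (0 : Int)))
        (by simp [pvDirections])
    obtain ⟨L2, hsub2, hinv3, hfact2⟩ :=
      pvBfsStep_inv (p := (px, py)) (hsub1 _ hpL) hinv2 (d := ((-1 : Int), (0 : Int)))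
        (by simp [pvDirections])
    obtain ⟨L3, hsub3, hinv4, hfact3⟩ :=
      pvBfsStep_inv (p := (px, py)) (hsub2 _ (hsub1 _ hpL)) hinv3 (d := ((0 : Int), (1 : Int)))
        (by simp [pvDirections])
    obtain ⟨L4, hsub4, hinv5, hfact4⟩ :=
      pvBfsStep_inv (p := (px, py)) (hsub3 _ (hsub2 _ (hsub1 _ hpL))) hinv4
        (d := ((0 : Int), (-1 : Int))) (by simp [pvDirections])
    simp only at hfact1 hfact2 hfact3 hfact4
    norm_num at hfact1 hfact2 hfact3 hfact4
    obtain ⟨hrepr4, hnd4, hdisj4, hgood4, hreach4, hcount4, hq4, hcl4, hs4⟩ := hinv5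
    have hfin : pvInv maps M N s V c0 [] stv L4 := by
      refine ⟨hrepr4, hnd4, hdisj4, hgood4, hreach4, hcount4, hq4, ?_, hs4⟩
      intro r hr _ hqr t ht hgt
      by_cases hrp : r = (px, py)
      · subst hrp
        simp only [pvNbrs, List.mem_cons, List.not_mem_nil, or_false] at ht
        rcases ht with h | h | h | h <;> subst h
        · exact hsub4 _ (hsub3 _ (hsub2 _ (hfact1 hgt)))
        · exact hsub4 _ (hsub3 _ (hfact2 hgt))
        · exact hsub4 _ (hfact3 hgt)
        · exact hfact4 hgt
      · exact hcl4 r hr (by simp [hrp]) hqr t ht hgt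
    obtain ⟨L', c', v', heq, hrest⟩ := ih L4 hfin
    refine ⟨L', c', v', ?_, hrest⟩
    rw [pvBfsLoop]
    exact heq

theorem pvFloodLoop_spec (maps : List String) (M N : Nat) (s : Int × Int)
    (V : List (Int × Int)) (c0 : Int) (hgs : pvGood maps (M : Int) (N : Int) V s) :
    ∀ (stack : List (Int × Int)) (seen : PySem.Set (Int × Int)) (total : Int),
      ∀ L, seen = V ++ L →
      L.Nodup → (∀ p ∈ L, p ∉ V) →
      (∀ p ∈ L, pvGood maps (M : Int) (N : Int) V p) →
      (∀ p ∈ L, pvReach maps (M : Int) (N : Int) V s p) →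
      total = c0 + pvSumVal maps L →
      (∀ t ∈ stack, t = s ∨ ∃ p ∈ L, t ∈ pvNbrs p) →
      (∀ p ∈ L, ∀ t ∈ pvNbrs p, pvGood maps (M : Int) (N : Int) V t → t ∈ L ∨ t ∈ stack) →
      (s ∈ L ∨ s ∈ stack) →
      ∃ L', L'.Nodup ∧ (∀ p ∈ L', p ∉ V) ∧
        (∀ p, p ∈ L' ↔ pvGood maps (M : Int) (N : Int) V p ∧
          pvReach maps (M : Int) (N : Int) V s p) ∧
        pvFloodLoop (M : Int) (N : Int) maps stack seen total =
          (c0 + pvSumVal maps L', V ++ L') := by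
  intro stack seen total
  induction stack, seen, total using pvFloodLoop.induct (m := (M : Int)) (n := (N : Int))
      (maps := maps) with
  | case1 seen total =>
    intro L hseen hnd hdisj hgood hreach htot hstk hcl hsL
    have hs : s ∈ L := by
      rcases hsL with h | h
      · exact h
      · simp at h
    refine ⟨L, hnd, hdisj, ?_, ?_⟩
    · intro r
      constructor
      · intro hr; exact ⟨hgood r hr, hreach r hr⟩
      · rintro ⟨hg, hrch⟩
        refine pvReach_subset hs (fun p hp t ht hgt => ?_) r hrch
        rcases hcl p hp t ht hgt with h | h
        · exact h
        · simp at h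
    · rw [pvFloodLoop, hseen, htot]
  | case2 seen total p rest hcond ih =>
    intro L hseen hnd hdisj hgood hreach htot hstk hcl hsL
    have hmemL : ∀ t, pvGood maps (M : Int) (N : Int) V t → t = p → t ∈ L := by
      intro t hgt hteq
      subst hteq
      obtain ⟨⟨b1, b2, b3, b4, b5⟩, htV⟩ := hgt
      rcases hcond with c | c | c
      · exact absurd ⟨b1, b2, b3, b4⟩ c
      · exact absurd c b5
      · rw [hseen] at c
        rcases List.mem_append.mp c with h | h
        · exact absurd h htV
        · exact h
    obtain ⟨L', h1, h2, h3, h4⟩ := ih L hseen hnd hdisj hgood hreach htot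
      (fun t ht => hstk t (by simp [ht]))
      (by
        intro r hr t ht hgt
        rcases hcl r hr t ht hgt with h | h
        · exact Or.inl h
        · rcases List.mem_cons.mp h with h | h
          · exact Or.inl (hmemL t hgt h)
          · exact Or.inr h)
      (by
        rcases hsL with h | h
        · exact Or.inl h
        · rcases List.mem_cons.mp h with h | h
          · exact Or.inl (hmemL s hgs h)
          · exact Or.inr h)
    refine ⟨L', h1, h2, h3, ?_⟩
    rw [pvFloodLoop, if_pos hcond]
    exact h4
  | case3 seen total p rest hcond ih =>
    intro L hseen hnd hdisj hgood hreach htot hstk hcl hsL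
    rw [not_or, not_or, not_not] at hcond
    obtain ⟨⟨b1, b2, b3, b4⟩, b5, b6⟩ := hcond
    have hpV : p ∉ V := fun h => b6 (by rw [hseen]; exact List.mem_append_left _ h)
    have hpL : p ∉ L := fun h => b6 (by rw [hseen]; exact List.mem_append_right _ h)
    have hgp : pvGood maps (M : Int) (N : Int) V p := ⟨⟨b1, b2, b3, b4, b5⟩, hpV⟩
    have hrp : pvReach maps (M : Int) (N : Int) V s p := by
      rcases hstk p (by simp) with h | ⟨r, hrL, hnbr⟩
      · subst h; exact Relation.ReflTransGen.refl
      · exact Relation.ReflTransGen.tail (hreach r hrL) ⟨hnbr, hgp⟩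
    have hseen' : PySem.Set.add seen p = V ++ (L ++ [p]) := by
      rw [PySem.Set.add_of_not_mem b6, hseen, List.append_assoc]
    obtain ⟨L', h1, h2, h3, h4⟩ := ih (L ++ [p]) hseen'
      (List.Nodup.append hnd (List.nodup_singleton _)
        (fun a ha hb => absurd ((List.mem_singleton.mp hb) ▸ ha) hpL))
      (by
        intro r hr
        rcases List.mem_append.mp hr with h | h
        · exact hdisj r h
        · rw [List.mem_singleton.mp h]; exact hpV)
      (by
        intro r hr
        rcases List.mem_append.mp hr with h | h
        · exact hgood r h
        · rw [List.mem_singleton.mp h]; exact hgp)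
      (by
        intro r hr
        rcases List.mem_append.mp hr with h | h
        · exact hreach r h
        · rw [List.mem_singleton.mp h]; exact hrp)
      (by
        rw [htot]
        simp only [pvSumVal, List.map_append, List.sum_append, List.map_cons, List.map_nil,
          List.sum_cons, List.sum_nil]
        omega)
      (by
        intro t ht
        simp only [List.mem_cons] at ht
        rcases ht with h | h | h | h | h
        · exact Or.inr ⟨p, List.mem_append_right _ (by simp), by rw [h]; simp [pvNbrs]⟩
        · exact Or.inr ⟨p, List.mem_append_right _ (by simp), by rw [h]; simp [pvNbrs]⟩
        · exact Or.inr ⟨p, List.mem_append_right _ (by simp), by rw [h]; simp [pvNbrs]⟩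
        · exact Or.inr ⟨p, List.mem_append_right _ (by simp), by rw [h]; simp [pvNbrs]⟩
        · rcases hstk t (by simp [h]) with h2 | ⟨r, hrL, hnbr⟩
          · exact Or.inl h2
          · exact Or.inr ⟨r, List.mem_append_left _ hrL, hnbr⟩)
      (by
        intro r hr t ht hgt
        rcases List.mem_append.mp hr with h | h
        · rcases hcl r h t ht hgt with h2 | h2
          · exact Or.inl (List.mem_append_left _ h2)
          · rcases List.mem_cons.mp h2 with h3 | h3
            · exact Or.inl (List.mem_append_right _ (by simp [h3]))
            · exact Or.inr (by simp [h3])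
        · rw [List.mem_singleton.mp h] at ht
          simp only [pvNbrs, List.mem_cons, List.not_mem_nil, or_false] at ht
          rcases ht with h3 | h3 | h3 | h3 <;> (rw [h3]; exact Or.inr (by simp)))
      (by
        rcases hsL with h | h
        · exact Or.inl (List.mem_append_left _ h)
        · rcases List.mem_cons.mp h with h2 | h2
          · exact Or.inl (List.mem_append_right _ (by simp [h2]))
          · exact Or.inr (by simp [h2]))
    refine ⟨L', h1, h2, h3, ?_⟩
    rw [pvFloodLoop]
    rw [if_neg (by
      rw [not_or, not_or, not_not]
      exact ⟨⟨b1, b2, b3, b4⟩, b5, b6⟩)]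
    exact h4

set_option maxHeartbeats 1000000 in
theorem pvSeed_eq {maps : List String} {M N : Nat} {v : List (List Int)}
    {seen : List (Int × Int)} {x y : Int}
    (hrepr : pvRepr M N v seen) (hnd : seen.Nodup)
    (hx : 0 ≤ x) (hx2 : x < (M : Int)) (hy : 0 ≤ y) (hy2 : y < (N : Int))
    (hcell : pvCell maps x y ≠ 'X') (huns : (x, y) ∉ seen) :
    ∃ c v' seen', pvBfs x y (M : Int) (N : Int) v maps = (c, v') ∧
      pvFloodLoop (M : Int) (N : Int) maps [(x, y)] seen 0 = (c, seen') ∧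
      pvRepr M N v' seen' ∧ seen'.Nodup := by
  have hgs : pvGood maps (M : Int) (N : Int) seen (x, y) :=
    ⟨⟨hx, hx2, hy, hy2, hcell⟩, huns⟩
  have hinv : pvInv maps M N (x, y) seen 0 []
      ([(x, y)], pvVSet v x y, pvVal maps x y) [(x, y)] := by
    refine ⟨pvRepr_set hrepr hx hx2 hy hy2, List.nodup_singleton _, ?_, ?_, ?_, ?_,
      fun r hr => hr, ?_, by simp⟩
    · intro r hr; rw [List.mem_singleton.mp hr]; exact huns
    · intro r hr; rw [List.mem_singleton.mp hr]; exact hgs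
    · intro r hr; rw [List.mem_singleton.mp hr]; exact Relation.ReflTransGen.refl
    · simp [pvSumVal]
    · intro r hr h1 h2
      exact absurd hr h2
  obtain ⟨L1, cA, vA, heqA, hcA, hreprA, hndA, hdisjA, hmemA⟩ :=
    pvBfsLoop_spec maps M N (x, y) seen 0 _ _ _ _ hinv
  obtain ⟨L2, hnd2, hdisj2, hmem2, heqB⟩ :=
    pvFloodLoop_spec maps M N (x, y) seen 0 hgs [(x, y)] seen 0 []
      (by simp) List.nodup_nil (by simp) (by simp) (by simp) (by simp [pvSumVal])
      (fun t ht => Or.inl (List.mem_singleton.mp ht)) (by simp) (Or.inr (by simp))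
  have hperm : L1.Perm L2 :=
    (List.perm_ext_iff_of_nodup hndA hnd2).mpr (fun a => (hmemA a).trans ((hmem2 a).symm))
  have hsum : pvSumVal maps L1 = pvSumVal maps L2 := by
    have h2 := (hperm.map (fun p => pvVal maps p.1 p.2)).sum_eq
    simpa [pvSumVal] using h2
  refine ⟨cA, vA, seen ++ L2, ?_, ?_, ?_, ?_⟩
  · unfold pvBfs
    exact heqA
  · rw [heqB, hcA, hsum]
  · exact pvRepr_congr
      (fun p => by simp only [List.mem_append, hperm.mem_iff]) hreprA
  · refine List.Nodup.append hnd hnd2 ?_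
    intro a ha hb
    exact ((hmem2 a).mp hb).1.2 ha

-- relation between A's and B's outer states
def pvRel (M N : Nat) (stA : List (List Int) × List Int)
    (stB : PySem.Set (Int × Int) × List Int) : Prop :=
  pvRepr M N stA.1 stB.1 ∧ stB.1.Nodup ∧ stA.2 = stB.2

theorem pvRow_rel (maps : List String) (M N : Nat) (x : Int)
    (hx : 0 ≤ x) (hx2 : x < (M : Int)) :
    ∀ (ys : List Int), (∀ y ∈ ys, 0 ≤ y ∧ y < (N : Int)) →
    ∀ stA stB, pvRel M N stA stB →
    pvRel M N
      (ys.foldl (fun (st : List (List Int) × List Int) y =>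
        if pvCell maps x y ≠ 'X' ∧ pvVGet st.1 x y = some 0 then
          let r := pvBfs x y (M : Int) (N : Int) st.1 maps
          (r.2, st.2 ++ [r.1])
        else st) stA)
      (ys.foldl (fun (st : PySem.Set (Int × Int) × List Int) y =>
        if pvCell maps x y ≠ 'X' ∧ (x, y) ∉ st.1 then
          let r := pvFloodLoop (M : Int) (N : Int) maps [(x, y)] st.1 0
          (r.2, st.2 ++ [r.1])
        else st) stB) := by
  intro ys
  induction ys with
  | nil => intro _ stA stB h; simpa using h
  | cons y ys ih =>
    intro hys stA stB h
    simp only [List.foldl_cons]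
    refine ih (fun z hz => hys z (by simp [hz])) _ _ ?_
    obtain ⟨hrepr, hnd, hans⟩ := h
    have hy := hys y (by simp)
    by_cases hcell : pvCell maps x y ≠ 'X'
    · by_cases hseen : (x, y) ∈ stB.1
      · have hvg : ¬ pvVGet stA.1 x y = some 0 :=
          fun hc => ((pvRepr_get hrepr hx hx2 hy.1 hy.2).mp hc) hseen
        rw [if_neg (fun hc => hvg hc.2), if_neg (fun hc => hc.2 hseen)]
        exact ⟨hrepr, hnd, hans⟩
      · have hvg : pvVGet stA.1 x y = some 0 :=
          (pvRepr_get hrepr hx hx2 hy.1 hy.2).mpr hseen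
        rw [if_pos ⟨hcell, hvg⟩, if_pos ⟨hcell, hseen⟩]
        obtain ⟨c, v', seen', hA, hB, hrepr', hnd'⟩ :=
          pvSeed_eq hrepr hnd hx hx2 hy.1 hy.2 hcell hseen
        simp only [hA, hB]
        exact ⟨hrepr', hnd', by rw [hans]⟩
    · rw [if_neg (fun hc => hcell hc.1), if_neg (fun hc => hcell hc.1)]
      exact ⟨hrepr, hnd, hans⟩

theorem pvOuter_rel (maps : List String) (M N : Nat) :
    ∀ (xs : List Int), (∀ x ∈ xs, 0 ≤ x ∧ x < (M : Int)) →
    ∀ stA stB, pvRel M N stA stB →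
    pvRel M N
      (xs.foldl (fun (st : List (List Int) × List Int) x =>
        (PySem.List.pyRange 0 (N : Int) 1).foldl (fun st y =>
          if pvCell maps x y ≠ 'X' ∧ pvVGet st.1 x y = some 0 then
            let r := pvBfs x y (M : Int) (N : Int) st.1 maps
            (r.2, st.2 ++ [r.1])
          else st) st) stA)
      (xs.foldl (fun (st : PySem.Set (Int × Int) × List Int) x =>
        (PySem.List.pyRange 0 (N : Int) 1).foldl (fun st y =>
          if pvCell maps x y ≠ 'X' ∧ (x, y) ∉ st.1 then
            let r := pvFloodLoop (M : Int) (N : Int) maps [(x, y)] st.1 0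
            (r.2, st.2 ++ [r.1])
          else st) st) stB) := by
  intro xs
  induction xs with
  | nil => intro _ stA stB h; simpa using h
  | cons x xs ih =>
    intro hxs stA stB h
    simp only [List.foldl_cons]
    refine ih (fun z hz => hxs z (by simp [hz])) _ _ ?_
    have hx := hxs x (by simp)
    refine pvRow_rel maps M N x hx.1 hx.2 _ ?_ stA stB h
    intro y hy
    rwa [PySem.List.mem_pyRange_one] at hy

theorem pvFinish (l : List Int) :
    (if l.length = 0 then ([-1] : List Int) else PySem.List.sorted l (fun v => v) false) =
    (if l = [] then ([-1] : List Int) else PySem.List.sorted l (fun v => v) false) := by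
  by_cases h : l = []
  · rw [if_pos h, if_pos (by simp [h])]
  · rw [if_neg h, if_neg (by simpa [List.length_eq_zero_iff] using h)]

-- ===== VERDICT (by name: the statement is the Claim_ definition above) =====
theorem solution_spec : Claim_equal_solution := by
  intro maps _ _
  unfold Spec_solution solution solution_alt
  have h0 : 0 ≤ pvN maps := by unfold pvN; positivity
  have hpvn : pvN maps = (((pvN maps).toNat : Nat) : Int) := (Int.toNat_of_nonneg h0).symm
  rw [hpvn]
  simp only [Int.toNat_natCast]
  have hrepr0 : pvRepr maps.length (pvN maps).toNat
      (List.replicate maps.length (List.replicate (pvN maps).toNat 0)) [] := by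
    refine ⟨by simp, by intro i hi; simp, ?_⟩
    intro i j hi hj
    simp only at *
    unfold pvVGet
    rw [PySem.List.pyGet?_natCast, List.getElem?_replicate, if_pos hi]
    simp only [Option.bind_some]
    rw [PySem.List.pyGet?_natCast, List.getElem?_replicate, if_pos hj]
    simp
  have h := pvOuter_rel maps maps.length (pvN maps).toNat
    (PySem.List.pyRange 0 (maps.length : Int) 1)
    (fun z hz => by rwa [PySem.List.mem_pyRange_one] at hz)
    (List.replicate maps.length (List.replicate (pvN maps).toNat 0), [])
    (PySem.Set.empty, []) ⟨hrepr0, List.nodup_nil, rfl⟩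
  rw [h.2.2]
  exact pvFinish _
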